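-- pv_equiv track=rewrite | github.com/wdd1016/ProgramingPractice | Baekjoon/Silver/Dynamic_Programming/11726_tailing.py | findrectanc
-- ===== SOURCE A (Python) =====
-- def findrectanc(num, lst):
-- 	if num == 1:
-- 		return 1
-- 	elif num == 2:
-- 		return 2
-- 	elif (lst[num] == 0):
-- 		lst[num] = (findrectanc(num - 2, lst) + \
-- 			findrectanc(num - 1, lst)) % 10007
-- 	return lst[num]
-- ===== SOURCE B (Python) =====
-- def findrectanc(num, lst):
--     if num == 1:
--         return 1
--     if num == 2:
--         return 2
--     if lst[num] != 0:          # answer already memoized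
--         return lst[num]
--     a, b = 1, 2
--     for k in range(3, num + 1):
--         a, b = b, (lst[k] if lst[k] != 0 else (a + b) % 10007)
--     return b
-- ===== Notes on version B (the rewrite author's own statement) =====
-- stated objective: alternative
-- what changed: Replaces the top-down memoized recursion that mutates the lst table with a memo fast path plus a bottom-up rolling-pair loop that keeps only the last two values, consults nonzero memo entries as it scans, and never writes to lst (return value only: A mutates lst, B does not).
-- outside the precondition, e.g. on findrectanc(0, [0, 5, 7]): A returns 12, B returns 2
import Mathlib
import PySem

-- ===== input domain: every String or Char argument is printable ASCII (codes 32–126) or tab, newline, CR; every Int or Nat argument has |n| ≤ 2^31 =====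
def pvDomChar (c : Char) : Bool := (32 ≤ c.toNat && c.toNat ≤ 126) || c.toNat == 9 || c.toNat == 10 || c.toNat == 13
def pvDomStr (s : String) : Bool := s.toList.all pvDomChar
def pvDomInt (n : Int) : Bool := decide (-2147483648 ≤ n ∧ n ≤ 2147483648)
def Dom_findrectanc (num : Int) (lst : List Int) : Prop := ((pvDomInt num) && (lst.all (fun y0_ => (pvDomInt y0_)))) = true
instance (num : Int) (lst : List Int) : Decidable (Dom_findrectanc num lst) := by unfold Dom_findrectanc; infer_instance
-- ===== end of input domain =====

-- B replaces A's memoized table-mutating recursion by a bottom-up rolling-pair loop (alternative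
-- decomposition, return value only: A mutates lst, B does not).

-- ===== PORT A =====
-- State-passing transliteration of A's recursion: the list is threaded through because A
-- assigns lst[num]. Fuel only makes the recursion total; inside Pre_ it never runs out.
def findrectancGoA : Nat → Int → List Int → Option (Int × List Int)
  | 0, _, _ => none
  | (fuel+1), num, lst =>
    if num = 1 then some (1, lst)
    else if num = 2 then some (2, lst)
    else
      match PySem.List.pyGet? lst num with      -- lst[num] (IndexError = none)
      | none => none
      | some v =>
        if v = 0 then
          match findrectancGoA fuel (num - 2) lst with
          | none => none
          | some (x, lst1) =>
            match findrectancGoA fuel (num - 1) lst1 with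
            | none => none
            | some (y, lst2) =>
              match PySem.List.pySet? lst2 num (PySem.Int.mod (x + y) 10007) with  -- lst[num] = …
              | none => none
              | some lst3 =>
                match PySem.List.pyGet? lst3 num with   -- return lst[num]
                | none => none
                | some r => some (r, lst3)
        else some (v, lst)                       -- return lst[num] (memo hit)

def findrectanc (num : Int) (lst : List Int) : Int :=
  match findrectancGoA (num.toNat + 1) num lst with
  | some (r, _) => r
  | none => 0

-- ===== PORT B =====
def findrectanc_alt (num : Int) (lst : List Int) : Int :=
  if num = 1 then 1
  else if num = 2 then 2
  else if PySem.List.pyGetD lst num 0 ≠ 0 then PySem.List.pyGetD lst num 0  -- memo fast path: lst[num]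
  else
    ((PySem.List.pyRange 3 (num + 1) 1).foldl
      (fun (ab : Int × Int) k =>
        let v := PySem.List.pyGetD lst k 0        -- lst[k]; in range under Pre_
        (ab.2, if v ≠ 0 then v else PySem.Int.mod (ab.1 + ab.2) 10007)) (1, 2)).2

-- ===== PRECONDITION & SPEC =====
-- Pre_ covers the natural domain (num ≥ 1, lst indexable at num when num ≥ 3) plus the num ≤ 0
-- inputs whose (possibly wrapped) cell lst[num] is already nonzero, where both programs return it;
-- excluded are inputs where A raises (IndexError / unbounded recursion) or assembles its value by
-- recursing through negative wrapped indices.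
def Pre_findrectanc (num : Int) (lst : List Int) : Prop :=
  (1 ≤ num ∧ (num ≤ 2 ∨ num < lst.length)) ∨
  (num ≤ 0 ∧ -(lst.length : Int) ≤ num ∧ PySem.List.pyGetD lst num 0 ≠ 0)
instance (num : Int) (lst : List Int) : Decidable (Pre_findrectanc num lst) := by
  unfold Pre_findrectanc; infer_instance
def pvWitness_findrectanc : Int × List Int := (4, [0, 0, 0, 5, 0])

def Spec_findrectanc (num : Int) (lst : List Int) (out : Int) : Prop := out = findrectanc_alt num lst
instance (num : Int) (lst : List Int) (out : Int) : Decidable (Spec_findrectanc num lst out) := by unfold Spec_findrectanc; infer_instance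

-- ===== CLAIM (what is proved, stated in full; the proofs are below) =====
def Claim_equal_findrectanc : Prop := ∀ (num : Int) (lst : List Int), Dom_findrectanc num lst → Pre_findrectanc num lst → Spec_findrectanc num lst (findrectanc num lst)

-- ===== LEMMAS AND PROOFS =====

-- The pure value both programs compute: cell k of the original list if nonzero, else the recurrence.
def gval (lst : List Int) : Nat → Int
  | 0 => 0
  | 1 => 1
  | 2 => 2
  | (k+3) =>
    let v := lst.getD (k+3) 0
    if v ≠ 0 then v else PySem.Int.mod (gval lst (k+1) + gval lst (k+2)) 10007

-- lst1 is lst0 with some originally-zero cells already filled in with their gval.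
def AgreeMemo (lst0 lst1 : List Int) : Prop :=
  lst1.length = lst0.length ∧
  ∀ i : Nat, i < lst0.length →
    lst1.getD i 0 = lst0.getD i 0 ∨ (lst0.getD i 0 = 0 ∧ lst1.getD i 0 = gval lst0 i)

theorem pyGet?_toNat (lst : List Int) (i : Int) (h0 : 0 ≤ i) (hl : i < lst.length) :
    PySem.List.pyGet? lst i = some (lst.getD i.toNat 0) := by
  have hlt : i.toNat < lst.length := by omega
  rw [PySem.List.pyGet?_eq_some_getElem lst h0 (by exact_mod_cast hl),
    List.getD_eq_getElem lst 0 hlt]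

theorem gval_of_ge3 (lst : List Int) (n : Nat) (h : 3 ≤ n) :
    gval lst n = (if lst.getD n 0 ≠ 0 then lst.getD n 0
                  else PySem.Int.mod (gval lst (n-2) + gval lst (n-1)) 10007) := by
  obtain ⟨k, rfl⟩ : ∃ k, n = k + 3 := ⟨n - 3, by omega⟩
  rfl

theorem pyGetD_toNat (lst : List Int) (i d : Int) (h : 0 ≤ i) :
    PySem.List.pyGetD lst i d = lst.getD i.toNat d := by
  have hi : i = ((i.toNat : Nat) : Int) := (Int.toNat_of_nonneg h).symm
  rw [hi, PySem.List.pyGetD_natCast, Int.toNat_natCast]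

theorem pyGet?_eq_some_getD (xs : List Int) (i : Int)
    (h1 : -(xs.length : Int) ≤ i) (h2 : i < xs.length) :
    PySem.List.pyGet? xs i = some (PySem.List.pyGetD xs i 0) := by
  cases h : PySem.List.pyGet? xs i with
  | none =>
    exact absurd ((PySem.List.pyGet?_eq_none_iff xs i).mp h) (not_not_intro (by constructor <;> omega))
  | some v =>
    rw [show PySem.List.pyGetD xs i 0 = (PySem.List.pyGet? xs i).getD 0 from rfl, h]
    rfl

theorem agreeMemo_refl (lst : List Int) : AgreeMemo lst lst :=
  ⟨rfl, fun _ _ => Or.inl rfl⟩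

theorem goA_correct (lst0 : List Int) :
    ∀ (fuel : Nat) (num : Int) (lst1 : List Int),
      AgreeMemo lst0 lst1 → 1 ≤ num → (num ≤ 2 ∨ num < lst0.length) → num.toNat < fuel →
      ∃ lst2, findrectancGoA fuel num lst1 = some (gval lst0 num.toNat, lst2) ∧ AgreeMemo lst0 lst2 := by
  intro fuel
  induction fuel with
  | zero => intro num lst1 _ _ _ hf; exact absurd hf (Nat.not_lt_zero _)
  | succ fuel ih =>
    intro num lst1 hA h1 h2 hf
    by_cases hn1 : num = 1
    · subst hn1
      exact ⟨lst1, by simp [findrectancGoA, gval], hA⟩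
    · by_cases hn2 : num = 2
      · subst hn2
        exact ⟨lst1, by simp [findrectancGoA, gval], hA⟩
      · have h3 : 3 ≤ num := by omega
        have hlen0 : num < lst0.length := by
          rcases h2 with h | h
          · omega
          · exact h
        have hlen1 : lst1.length = lst0.length := hA.1
        have hv : PySem.List.pyGet? lst1 num = some (lst1.getD num.toNat 0) :=
          pyGet?_toNat lst1 num (by omega) (by omega)
        have hn3 : 3 ≤ num.toNat := by omega
        by_cases hz : lst1.getD num.toNat 0 = 0
        · -- cell unfilled: A recurses and writes
          have hz0 : lst0.getD num.toNat 0 = 0 := by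
            rcases hA.2 num.toNat (by omega) with h | h
            · rw [← h]; exact hz
            · exact h.1
          obtain ⟨lstA, hAeq, hAag⟩ :=
            ih (num - 2) lst1 hA (by omega) (Or.inr (by omega)) (by omega)
          obtain ⟨lstB, hBeq, hBag⟩ :=
            ih (num - 1) lstA hAag (by omega) (Or.inr (by omega)) (by omega)
          have hlenB : lstB.length = lst0.length := hBag.1
          have hset : PySem.List.pySet? lstB num
              (PySem.Int.mod (gval lst0 (num - 2).toNat + gval lst0 (num - 1).toNat) 10007)
              = some (lstB.set num.toNat
                (PySem.Int.mod (gval lst0 (num - 2).toNat + gval lst0 (num - 1).toNat) 10007)) := by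
            have h := PySem.List.pySet?_natCast lstB num.toNat
              (PySem.Int.mod (gval lst0 (num - 2).toNat + gval lst0 (num - 1).toNat) 10007)
              (by omega)
            rwa [Int.toNat_of_nonneg (by omega : (0:Int) ≤ num)] at h
          have hget3 : PySem.List.pyGet?
              (lstB.set num.toNat
                (PySem.Int.mod (gval lst0 (num - 2).toNat + gval lst0 (num - 1).toNat) 10007)) num
              = some (PySem.Int.mod (gval lst0 (num - 2).toNat + gval lst0 (num - 1).toNat) 10007) := by
            have h := pyGet?_toNat
              (lstB.set num.toNat
                (PySem.Int.mod (gval lst0 (num - 2).toNat + gval lst0 (num - 1).toNat) 10007)) num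
              (by omega) (by simp only [List.length_set]; omega)
            rw [h, List.getD_eq_getElem _ 0 (by simp only [List.length_set]; omega),
              List.getElem_set_self]
          have hwval : PySem.Int.mod (gval lst0 (num - 2).toNat + gval lst0 (num - 1).toNat) 10007
              = gval lst0 num.toNat := by
            rw [gval_of_ge3 lst0 num.toNat hn3, if_neg (not_not_intro hz0),
              show (num - 2).toNat = num.toNat - 2 from by omega,
              show (num - 1).toNat = num.toNat - 1 from by omega]
          refine ⟨lstB.set num.toNat
              (PySem.Int.mod (gval lst0 (num - 2).toNat + gval lst0 (num - 1).toNat) 10007),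
              ?_, ?_⟩
          · rw [show findrectancGoA (fuel + 1) num lst1 =
                (if num = 1 then some (1, lst1)
                 else if num = 2 then some (2, lst1)
                 else
                   match PySem.List.pyGet? lst1 num with
                   | none => none
                   | some v =>
                     if v = 0 then
                       match findrectancGoA fuel (num - 2) lst1 with
                       | none => none
                       | some (x, l1) =>
                         match findrectancGoA fuel (num - 1) l1 with
                         | none => none
                         | some (y, l2) =>
                           match PySem.List.pySet? l2 num (PySem.Int.mod (x + y) 10007) with
                           | none => none
                           | some l3 =>
                             match PySem.List.pyGet? l3 num with
                             | none => none
                             | some r => some (r, l3)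
                     else some (v, lst1)) from rfl]
            rw [if_neg hn1, if_neg hn2, hv]
            simp only [hz, if_pos, hAeq, hBeq, hset, hget3]
            rw [hwval]
          · refine ⟨by rw [List.length_set]; exact hlenB, fun i hi => ?_⟩
            by_cases hin : i = num.toNat
            · subst hin
              right
              refine ⟨hz0, ?_⟩
              rw [List.getD_eq_getElem _ 0 (by simp only [List.length_set]; omega),
                List.getElem_set_self, hwval]
            · have hsame : (lstB.set num.toNat
                  (PySem.Int.mod (gval lst0 (num - 2).toNat + gval lst0 (num - 1).toNat) 10007)).getD i 0
                  = lstB.getD i 0 := by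
                by_cases hil : i < lstB.length
                · rw [List.getD_eq_getElem _ 0 (by simp only [List.length_set]; omega),
                    List.getD_eq_getElem _ 0 hil, List.getElem_set_ne (by omega)]
                · rw [List.getD_eq_default _ 0 (by simp only [List.length_set]; omega),
                    List.getD_eq_default _ 0 (by omega)]
              rw [hsame]
              exact hBag.2 i hi
        · -- memo hit
          have hval : lst1.getD num.toNat 0 = gval lst0 num.toNat := by
            rcases hA.2 num.toNat (by omega) with h | h
            · rw [gval_of_ge3 lst0 num.toNat hn3, if_pos (by rw [← h]; simpa using hz), ← h]
            · exact h.2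
          refine ⟨lst1, ?_, hA⟩
          rw [show findrectancGoA (fuel + 1) num lst1 =
              (if num = 1 then some (1, lst1)
               else if num = 2 then some (2, lst1)
               else
                 match PySem.List.pyGet? lst1 num with
                 | none => none
                 | some v =>
                   if v = 0 then
                     match findrectancGoA fuel (num - 2) lst1 with
                     | none => none
                     | some (x, l1) =>
                       match findrectancGoA fuel (num - 1) l1 with
                       | none => none
                       | some (y, l2) =>
                         match PySem.List.pySet? l2 num (PySem.Int.mod (x + y) 10007) with
                         | none => none
                         | some l3 =>
                           match PySem.List.pyGet? l3 num with
                           | none => none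
                           | some r => some (r, l3)
                   else some (v, lst1)) from rfl]
          have hz' : ¬ (gval lst0 num.toNat = 0) := by rw [← hval]; exact hz
          rw [if_neg hn1, if_neg hn2, hv]
          simp only [hval, if_neg hz']

theorem altB_correct (lst : List Int) :
    ∀ (n : Nat), 2 ≤ n →
      ((PySem.List.pyRange 3 ((n : Int) + 1) 1).foldl
        (fun (ab : Int × Int) k =>
          let v := PySem.List.pyGetD lst k 0
          (ab.2, if v ≠ 0 then v else PySem.Int.mod (ab.1 + ab.2) 10007)) (1, 2))
      = (gval lst (n-1), gval lst n) := by
  intro n hn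
  induction n, hn using Nat.le_induction with
  | base =>
    rw [show ((2 : Nat) : Int) + 1 = 3 from by norm_num,
      PySem.List.pyRange_one_eq_nil (by omega)]
    simp [gval]
  | succ n hn ih =>
    have hcast : (((n + 1 : Nat) : Int)) + 1 = ((n : Int) + 1) + 1 := by push_cast; ring
    rw [hcast, PySem.List.pyRange_one_succ_right (by omega), List.foldl_append, ih,
      List.foldl_cons, List.foldl_nil]
    have hg : PySem.List.pyGetD lst ((n : Int) + 1) 0 = lst.getD (n + 1) 0 := by
      rw [show ((n : Int) + 1) = (((n + 1 : Nat) : Nat) : Int) from by push_cast; ring,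
        PySem.List.pyGetD_natCast]
    simp only [hg]
    rw [gval_of_ge3 lst (n + 1) (by omega)]
    have e1 : n + 1 - 1 = n := by omega
    have e2 : n + 1 - 2 = n - 1 := by omega
    rw [e1, e2]

-- ===== VERDICT (by name: the statement is the Claim_ definition above) =====
theorem findrectanc_spec : Claim_equal_findrectanc := by
  intro num lst _ hP
  show findrectanc num lst = findrectanc_alt num lst
  by_cases hn1 : num = 1
  · subst hn1; rfl
  by_cases hn2 : num = 2
  · subst hn2; rfl
  rcases hP with ⟨h1, h2⟩ | ⟨hle, hlo, hnz⟩
  · -- num ≥ 3: both sides equal the recurrence value gval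
    have h3 : 3 ≤ num := by omega
    obtain ⟨lst2, heq, _⟩ :=
      goA_correct lst (num.toNat + 1) num lst (agreeMemo_refl lst) h1 h2 (by omega)
    rw [findrectanc, heq]
    rw [findrectanc_alt, if_neg hn1, if_neg hn2]
    have hgd : PySem.List.pyGetD lst num 0 = lst.getD num.toNat 0 :=
      pyGetD_toNat lst num 0 (by omega)
    by_cases hz : lst.getD num.toNat 0 = 0
    · rw [if_neg (by rw [hgd]; exact not_not_intro hz)]
      rw [show num + 1 = ((num.toNat : Nat) : Int) + 1 from by omega,
        altB_correct lst num.toNat (by omega)]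
    · rw [if_pos (by rw [hgd]; exact hz), hgd,
        gval_of_ge3 lst num.toNat (by omega), if_pos hz]
  · -- num ≤ 0 with a nonzero (wrapped) cell: both return lst[num] immediately
    have hlen1 : 1 ≤ (lst.length : Int) := by
      by_contra hl
      have hnil : lst = [] := List.length_eq_zero_iff.mp (by omega)
      subst hnil
      exact hnz (by rw [show PySem.List.pyGetD ([] : List Int) num 0
        = (PySem.List.pyGet? ([] : List Int) num).getD 0 from rfl,
        (PySem.List.pyGet?_eq_none_iff ([] : List Int) num).mpr
          (by simp only [List.length_nil]; rintro ⟨hA, hB⟩; omega)]; rfl)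
    have hsome : PySem.List.pyGet? lst num = some (PySem.List.pyGetD lst num 0) :=
      pyGet?_eq_some_getD lst num (by omega) (by omega)
    have hfuel : num.toNat + 1 = 1 := by omega
    have hA : findrectancGoA 1 num lst = some (PySem.List.pyGetD lst num 0, lst) := by
      rw [show findrectancGoA 1 num lst =
          (if num = 1 then some (1, lst)
           else if num = 2 then some (2, lst)
           else
             match PySem.List.pyGet? lst num with
             | none => none
             | some v =>
               if v = 0 then
                 match findrectancGoA 0 (num - 2) lst with
                 | none => none
                 | some (x, l1) =>
                   match findrectancGoA 0 (num - 1) l1 with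
                   | none => none
                   | some (y, l2) =>
                     match PySem.List.pySet? l2 num (PySem.Int.mod (x + y) 10007) with
                     | none => none
                     | some l3 =>
                       match PySem.List.pyGet? l3 num with
                       | none => none
                       | some r => some (r, l3)
               else some (v, lst)) from rfl]
      rw [if_neg hn1, if_neg hn2, hsome]
      simp only [if_neg hnz]
    simp only [findrectanc, hfuel, hA, findrectanc_alt, if_neg hn1, if_neg hn2, if_pos hnz]
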